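-- pv_equiv track=rewrite | github.com/AdorableYoyo/DESSML | microbiomemeta/data/utils/conservation.py | select_positions_by_default_consensus
-- ===== SOURCE A (Python) =====
-- def select_positions_by_default_consensus(consensus, max_seq_len):
--     """ Select conserved positions based on the "#=GC seq_cons" line in .aln files.
--
--     Args:
--         consensus (str): the consensus sequence.
--         max_seq_len (int): maximum length of selected postions.
--
--     Return (list):
--         Selected postions as list of ints.
--     """
--     hcpositions = []  # high-conserved
--     lcpositions = []  # low-conserved
--     cspositions = []  # conservative-substitution
--     inspositions = []  # insertion '.'
--     delpositions = []  # deletion '-'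
--     for i, aa in enumerate(consensus):
--         if aa.isupper():
--             hcpositions.append(i)
--         elif aa.islower():
--             lcpositions.append(i)
--         elif aa == "+":
--             cspositions.append(i)
--         elif aa == ".":
--             inspositions.append(i)
--         elif aa == "-":
--             delpositions.append(i)
--         else:
--             continue
--     selected_positions = (
--         hcpositions + lcpositions + cspositions + delpositions + inspositions
--     )
--     selected_positions = selected_positions[:max_seq_len]
--     selected_positions = sorted(selected_positions)
--     return selected_positions
-- ===== SOURCE B (Python) =====
-- def _priority(aa):
--     if aa.isupper():
--         return 0
--     if aa.islower():
--         return 1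
--     return {"+": 2, "-": 3, ".": 4}.get(aa)
--
--
-- def select_positions_by_default_consensus(consensus, max_seq_len):
--     """Single keyed sort: encode each classified position as priority*n + index,
--     sort the coded keys once, truncate, and decode the index with % n."""
--     n = len(consensus)
--     keys = []
--     for i, aa in enumerate(consensus):
--         p = _priority(aa)
--         if p is not None:
--             keys.append(p * n + i)
--     keys = sorted(keys)[:max_seq_len]
--     return sorted(k % n for k in keys)
-- ===== Notes on version B (the rewrite author's own statement) =====
-- stated objective: alternative
-- what changed: A partitions positions into five bucket lists, concatenates them, truncates and sorts; B encodes each classified position as a single integer key priority*len(consensus)+index, sorts the keys once, truncates, and decodes the indices with % len(consensus).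
import Mathlib
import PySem

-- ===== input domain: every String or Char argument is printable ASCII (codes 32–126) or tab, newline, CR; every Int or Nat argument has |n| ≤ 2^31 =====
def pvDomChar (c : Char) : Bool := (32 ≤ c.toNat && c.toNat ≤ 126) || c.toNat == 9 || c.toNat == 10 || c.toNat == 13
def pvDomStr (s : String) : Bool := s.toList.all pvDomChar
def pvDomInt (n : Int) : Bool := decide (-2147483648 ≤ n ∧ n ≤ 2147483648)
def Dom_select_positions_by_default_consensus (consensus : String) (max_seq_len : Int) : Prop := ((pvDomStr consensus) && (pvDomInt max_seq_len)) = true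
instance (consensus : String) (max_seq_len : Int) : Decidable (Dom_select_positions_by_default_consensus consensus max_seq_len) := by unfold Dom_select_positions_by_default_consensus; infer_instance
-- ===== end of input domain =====

-- B replaces A's five position buckets by one list of coded keys priority*n+index, sorted once
-- and decoded with % n — same return value, a different decomposition (objective: alternative).

-- ===== PORT A =====
-- the loop body of A (five accumulators; branches in A's order: upper, lower, '+', '.', '-')
def pvStepA (st : List Int × List Int × List Int × List Int × List Int) (p : Int × Char) :
    List Int × List Int × List Int × List Int × List Int :=
  let (hc, lc, cs, ins, del) := st
  if PySem.Chars.isupper p.2 then (hc ++ [p.1], lc, cs, ins, del)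
  else if PySem.Chars.islower p.2 then (hc, lc ++ [p.1], cs, ins, del)
  else if p.2 = '+' then (hc, lc, cs ++ [p.1], ins, del)
  else if p.2 = '.' then (hc, lc, cs, ins ++ [p.1], del)
  else if p.2 = '-' then (hc, lc, cs, ins, del ++ [p.1])
  else (hc, lc, cs, ins, del)

def select_positions_by_default_consensus (consensus : String) (max_seq_len : Int) : List Int :=
  let st := (PySem.List.enumerate consensus.toList 0).foldl pvStepA ([], [], [], [], [])
  -- hc + lc + cs + del + ins  (tuple component order is hc, lc, cs, ins, del)
  let selected := st.1 ++ st.2.1 ++ st.2.2.1 ++ st.2.2.2.2 ++ st.2.2.2.1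
  PySem.List.sorted (PySem.List.slice selected none (some max_seq_len)) (fun x => x) false

-- ===== PORT B =====
-- _priority from Source B
def pvPriority (aa : Char) : Option Int :=
  if PySem.Chars.isupper aa then some 0
  else if PySem.Chars.islower aa then some 1
  else (PySem.Dict.ofList [('+', (2 : Int)), ('-', 3), ('.', 4)]).get? aa

def select_positions_by_default_consensus_alt (consensus : String) (max_seq_len : Int) : List Int :=
  let n : Int := consensus.toList.length
  let keys := (PySem.List.enumerate consensus.toList 0).foldl
    (fun acc p => match pvPriority p.2 with
      | some q => acc ++ [q * n + p.1]
      | none => acc) []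
  let keys2 := PySem.List.slice (PySem.List.sorted keys (fun x => x) false) none (some max_seq_len)
  PySem.List.sorted (keys2.map (fun k => PySem.Int.mod k n)) (fun x => x) false

-- ===== PRECONDITION & SPEC =====
def Spec_select_positions_by_default_consensus (consensus : String) (max_seq_len : Int) (out : List Int) : Prop := out = select_positions_by_default_consensus_alt consensus max_seq_len
instance (consensus : String) (max_seq_len : Int) (out : List Int) : Decidable (Spec_select_positions_by_default_consensus consensus max_seq_len out) := by unfold Spec_select_positions_by_default_consensus; infer_instance

-- ===== CLAIM (what is proved, stated in full; the proofs are below) =====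
def Claim_equal_select_positions_by_default_consensus : Prop := ∀ (consensus : String) (max_seq_len : Int), Dom_select_positions_by_default_consensus consensus max_seq_len → Spec_select_positions_by_default_consensus consensus max_seq_len (select_positions_by_default_consensus consensus max_seq_len)

-- ===== LEMMAS AND PROOFS =====

-- positions of priority k, in index order
def pvBkt (k : Int) (E : List (Int × Char)) : List Int :=
  E.filterMap (fun p => if pvPriority p.2 = some k then some p.1 else none)

-- B's coded keys as a filterMap
def pvKeys (n : Int) (E : List (Int × Char)) : List Int :=
  E.filterMap (fun p => (pvPriority p.2).map (fun q => q * n + p.1))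

lemma pvPriority_spec (c : Char) :
    pvPriority c =
      if PySem.Chars.isupper c then some 0
      else if PySem.Chars.islower c then some 1
      else if c = '+' then some 2
      else if c = '-' then some 3
      else if c = '.' then some 4
      else none := by
  unfold pvPriority
  split_ifs with h1 h2 h3 h4 h5 <;> try rfl
  · subst h3; rfl
  · subst h4; rfl
  · subst h5; rfl
  · have he : PySem.Dict.ofList [('+', (2 : Int)), ('-', 3), ('.', 4)] =
        PySem.Dict.mk [('+', (2 : Int)), ('-', 3), ('.', 4)] := rfl
    rw [he]
    simp only [PySem.Dict.get?_mk_cons, beq_iff_eq]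
    rw [if_neg (fun h => h3 h.symm), if_neg (fun h => h4 h.symm), if_neg (fun h => h5 h.symm)]
    rfl

lemma pvFoldA (E : List (Int × Char)) (a b c d e : List Int) :
    E.foldl pvStepA (a, b, c, d, e) =
      (a ++ pvBkt 0 E, b ++ pvBkt 1 E, c ++ pvBkt 2 E, d ++ pvBkt 4 E, e ++ pvBkt 3 E) := by
  induction E generalizing a b c d e with
  | nil => simp [pvBkt]
  | cons p t ih =>
    have hp := pvPriority_spec p.2
    simp only [List.foldl_cons, pvStepA]
    split_ifs with h1 h2 h3 h4 h5 <;> simp_all [pvBkt]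

lemma pvFoldB (n : Int) (E : List (Int × Char)) (acc : List Int) :
    E.foldl (fun acc p => match pvPriority p.2 with
      | some q => acc ++ [q * n + p.1]
      | none => acc) acc = acc ++ pvKeys n E := by
  induction E generalizing acc with
  | nil => simp [pvKeys]
  | cons p t ih =>
    cases h : pvPriority p.2 <;> simp [pvKeys, h, ih]

lemma pvPriority_range (c : Char) :
    pvPriority c = none ∨ pvPriority c = some 0 ∨ pvPriority c = some 1 ∨
    pvPriority c = some 2 ∨ pvPriority c = some 3 ∨ pvPriority c = some 4 := by
  rw [pvPriority_spec]; split_ifs <;> simp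

-- inserting the head of a cons into position 2/3/4/5 of a concatenation, up to permutation
lemma pvIns1 {x : Int} {R A B : List Int} (ih : R.Perm (A ++ B)) : (x :: R).Perm (A ++ x :: B) :=
  (ih.cons x).trans List.perm_middle.symm

lemma pvIns2 {x : Int} {R A B C : List Int} (ih : R.Perm (A ++ (B ++ C))) :
    (x :: R).Perm (A ++ (B ++ x :: C)) := by
  have h : (x :: ((A ++ B) ++ C)).Perm ((A ++ B) ++ x :: C) := List.perm_middle.symm
  exact (ih.cons x).trans (by simpa [List.append_assoc] using h)

lemma pvIns3 {x : Int} {R A B C D : List Int} (ih : R.Perm (A ++ (B ++ (C ++ D)))) :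
    (x :: R).Perm (A ++ (B ++ (C ++ x :: D))) := by
  have h : (x :: ((A ++ B ++ C) ++ D)).Perm ((A ++ B ++ C) ++ x :: D) := List.perm_middle.symm
  exact (ih.cons x).trans (by simpa [List.append_assoc] using h)

lemma pvIns4 {x : Int} {R A B C D E : List Int} (ih : R.Perm (A ++ (B ++ (C ++ (D ++ E))))) :
    (x :: R).Perm (A ++ (B ++ (C ++ (D ++ x :: E)))) := by
  have h : (x :: ((A ++ B ++ C ++ D) ++ E)).Perm ((A ++ B ++ C ++ D) ++ x :: E) := List.perm_middle.symm
  exact (ih.cons x).trans (by simpa [List.append_assoc] using h)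

-- the coded keys are a permutation of the five priority groups, coded
lemma pvKeys_perm (n : Int) (E : List (Int × Char)) :
    (pvKeys n E).Perm
      ((pvBkt 0 E).map (fun i => 0 * n + i) ++ ((pvBkt 1 E).map (fun i => 1 * n + i) ++
       ((pvBkt 2 E).map (fun i => 2 * n + i) ++ ((pvBkt 3 E).map (fun i => 3 * n + i) ++
       (pvBkt 4 E).map (fun i => 4 * n + i))))) := by
  induction E with
  | nil => simp [pvKeys, pvBkt]
  | cons p t ih =>
    rcases pvPriority_range p.2 with h | h | h | h | h | h <;>
      simp only [pvKeys, pvBkt, List.filterMap_cons, h, Option.map_some, Option.map_none,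
        reduceCtorEq, Option.some.injEq, List.map_cons, List.cons_append,
        if_pos, reduceIte] at ih ⊢
    · exact ih
    · exact ih.cons _
    · exact pvIns1 ih
    · exact pvIns2 ih
    · exact pvIns3 ih
    · exact pvIns4 ih

-- every bucket element is an index of the enumeration: 0 ≤ i < length
lemma pvBkt_mem_bounds (k : Int) (cs : List Char) (i : Int)
    (h : i ∈ pvBkt k (PySem.List.enumerate cs 0)) : 0 ≤ i ∧ i < cs.length := by
  simp only [pvBkt, List.mem_filterMap] at h
  obtain ⟨p, hp, hcond⟩ := h
  rw [PySem.List.mem_enumerate_iff] at hp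
  obtain ⟨j, hj, rfl⟩ := hp
  split_ifs at hcond
  cases hcond
  simp only [zero_add]
  omega

lemma pvBkt_pairwise (k : Int) (cs : List Char) :
    (pvBkt k (PySem.List.enumerate cs 0)).Pairwise (· < ·) := by
  unfold pvBkt
  rw [List.pairwise_filterMap]
  refine (PySem.List.pairwise_lt_enumerate cs 0).imp ?_
  intro a b hab x hx y hy
  split_ifs at hx hy
  cases hx; cases hy; exact hab

-- slicing commutes with map (the slice bounds only read the length)
lemma pvSliceMap {α β : Type} (f : α → β) (l : List α) (a? b? : Option Int) :
    (PySem.List.slice l a? b?).map f = PySem.List.slice (l.map f) a? b? := by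
  cases a? <;> cases b? <;>
    simp [PySem.List.slice, List.map_take, List.map_drop]

theorem pv_main (consensus : String) (max_seq_len : Int) :
    select_positions_by_default_consensus consensus max_seq_len =
      select_positions_by_default_consensus_alt consensus max_seq_len := by
  unfold select_positions_by_default_consensus select_positions_by_default_consensus_alt
  set cs := consensus.toList with hcs
  set E := PySem.List.enumerate cs 0 with hE
  set n : Int := (cs.length : Int) with hn
  simp only [pvFoldA E [] [] [] [] [], pvFoldB n E [], List.nil_append]
  -- the sorted coded keys are exactly the five coded groups in order
  have hsorted : PySem.List.sorted (pvKeys n E) (fun x => x) false =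
      (pvBkt 0 E).map (fun i => 0 * n + i) ++ ((pvBkt 1 E).map (fun i => 1 * n + i) ++
      ((pvBkt 2 E).map (fun i => 2 * n + i) ++ ((pvBkt 3 E).map (fun i => 3 * n + i) ++
      (pvBkt 4 E).map (fun i => 4 * n + i)))) := by
    apply PySem.List.sorted_eq_of_perm_of_pairwise_lt
    · exact (pvKeys_perm n E).symm
    · -- strictly increasing concatenation
      have hb : ∀ k i, i ∈ pvBkt k E → 0 ≤ i ∧ i < n := fun k i h => pvBkt_mem_bounds k cs i h
      have hpw : ∀ k : Int, (pvBkt k E).Pairwise (· < ·) := fun k => pvBkt_pairwise k cs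
      simp only [List.pairwise_append, List.pairwise_map, List.mem_map]
      refine ⟨(hpw 0).imp (by intro a b h; omega), ⟨(hpw 1).imp (by intro a b h; omega),
        ⟨(hpw 2).imp (by intro a b h; omega), ⟨(hpw 3).imp (by intro a b h; omega),
          (hpw 4).imp (by intro a b h; omega), ?_⟩, ?_⟩, ?_⟩, ?_⟩
      · rintro a ⟨i, hi, rfl⟩ b ⟨j, hj, rfl⟩
        have h1 := hb 3 i hi; have h2 := hb 4 j hj; omega
      · rintro a ⟨i, hi, rfl⟩ b hb'
        rcases List.mem_append.1 hb' with h | h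
        · obtain ⟨j, hj, rfl⟩ := List.mem_map.1 h
          have h1 := hb 2 i hi; have h2 := hb 3 j hj; omega
        · obtain ⟨j, hj, rfl⟩ := List.mem_map.1 h
          have h1 := hb 2 i hi; have h2 := hb 4 j hj; omega
      · rintro a ⟨i, hi, rfl⟩ b hb'
        rcases List.mem_append.1 hb' with h | h
        · obtain ⟨j, hj, rfl⟩ := List.mem_map.1 h
          have h1 := hb 1 i hi; have h2 := hb 2 j hj; omega
        · rcases List.mem_append.1 h with h' | h'
          · obtain ⟨j, hj, rfl⟩ := List.mem_map.1 h'
            have h1 := hb 1 i hi; have h2 := hb 3 j hj; omega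
          · obtain ⟨j, hj, rfl⟩ := List.mem_map.1 h'
            have h1 := hb 1 i hi; have h2 := hb 4 j hj; omega
      · rintro a ⟨i, hi, rfl⟩ b hb'
        rcases List.mem_append.1 hb' with h | h
        · obtain ⟨j, hj, rfl⟩ := List.mem_map.1 h
          have h1 := hb 0 i hi; have h2 := hb 1 j hj; omega
        · rcases List.mem_append.1 h with h' | h'
          · obtain ⟨j, hj, rfl⟩ := List.mem_map.1 h'
            have h1 := hb 0 i hi; have h2 := hb 2 j hj; omega
          · rcases List.mem_append.1 h' with h'' | h''
            · obtain ⟨j, hj, rfl⟩ := List.mem_map.1 h''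
              have h1 := hb 0 i hi; have h2 := hb 3 j hj; omega
            · obtain ⟨j, hj, rfl⟩ := List.mem_map.1 h''
              have h1 := hb 0 i hi; have h2 := hb 4 j hj; omega
  rw [hsorted]
  -- decoding k % n over a coded group gives back the group
  have hdec : ∀ k : Int, ((pvBkt k E).map (fun i => k * n + i)).map
      (fun x => PySem.Int.mod x n) = pvBkt k E := by
    intro k
    rw [List.map_map]
    have hcongr : ∀ i ∈ pvBkt k E, PySem.Int.mod (k * n + i) n = i := by
      intro i hi
      obtain ⟨h0, h1⟩ := pvBkt_mem_bounds k cs i hi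
      rw [PySem.Int.mod_eq_emod_of_pos (by omega)]
      have he : k * n + i = i + n * k := by ring
      rw [he, Int.add_mul_emod_self_left]
      exact Int.emod_eq_of_lt h0 h1
    exact (List.map_congr_left hcongr).trans (List.map_id _)
  rw [pvSliceMap]
  simp only [List.map_append, hdec 0, hdec 1, hdec 2, hdec 3, hdec 4, List.append_assoc]

-- ===== VERDICT (by name: the statement is the Claim_ definition above) =====
theorem select_positions_by_default_consensus_spec : Claim_equal_select_positions_by_default_consensus := by
  intro consensus max_seq_len _
  unfold Spec_select_positions_by_default_consensus
  exact pv_main consensus max_seq_len
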